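-- pv_equiv track=rewrite | github.com/hammij/WineProject | wine_descip(1)(1).py | uniqueMatrix
-- ===== SOURCE A (Python) =====
-- def uniqueMatrix(uniq_list):
--     param = len(uniq_list)
--     matrix = []
--     for i in range(param):
--         matrix.append({})
--         for j in range(param):
--             word = uniq_list[j]
--             row = matrix[i]
--             row[word] = 0
--     return matrix
-- ===== SOURCE B (Python) =====
-- def uniqueMatrix(uniq_list):
--     # One pass dedups the words with a set (keeping first occurrences),
--     # then each row is built over the distinct keys only.
--     seen = set()
--     keys = []
--     for w in uniq_list:
--         if w not in seen:
--             seen.add(w)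
--             keys.append(w)
--     return [{k: 0 for k in keys} for _ in range(len(uniq_list))]
-- ===== Notes on version B (the rewrite author's own statement) =====
-- stated objective: alternative
-- what changed: B first deduplicates the words in a single pass with a seen-set and then builds each row over the distinct keys only, instead of A's nested loops that re-insert (and overwrite) every word of the full list into every row.
import Mathlib
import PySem

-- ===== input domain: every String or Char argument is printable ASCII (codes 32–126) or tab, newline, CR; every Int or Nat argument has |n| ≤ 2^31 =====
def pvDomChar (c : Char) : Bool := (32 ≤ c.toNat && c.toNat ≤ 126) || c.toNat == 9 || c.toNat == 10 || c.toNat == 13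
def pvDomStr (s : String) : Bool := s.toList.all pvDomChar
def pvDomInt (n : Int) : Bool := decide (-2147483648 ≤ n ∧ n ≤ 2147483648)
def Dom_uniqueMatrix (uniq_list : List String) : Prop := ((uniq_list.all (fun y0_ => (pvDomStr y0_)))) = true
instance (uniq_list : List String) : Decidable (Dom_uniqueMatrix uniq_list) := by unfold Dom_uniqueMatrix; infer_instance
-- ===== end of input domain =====

-- B deduplicates the words with a seen-set in one pass, then builds each row over the
-- distinct keys only, instead of A's nested loops re-inserting every word into every row.

-- ===== PORT A =====
-- Literal port of A: outer loop appends a fresh dict, inner loop writes uniq_list[j] ↦ 0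
-- into matrix[i]. The pyGetD/pySetD defaults are never used: i and j stay in range.
def uniqueMatrix (uniq_list : List String) : List (List (String × Int)) :=
  let param : Int := PySem.List.len uniq_list
  let matrix : List (PySem.Dict String Int) :=
    (PySem.List.pyRange 0 param 1).foldl (fun matrix i =>
      let matrix := matrix ++ [(PySem.Dict.empty : PySem.Dict String Int)]
      (PySem.List.pyRange 0 param 1).foldl (fun matrix j =>
        let word := PySem.List.pyGetD uniq_list j ""
        let row := PySem.List.pyGetD matrix i PySem.Dict.empty
        PySem.List.pySetD matrix i (row.insert word 0)) matrix) []
  matrix.map PySem.Dict.items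

-- ===== PORT B =====
-- B's dedup loop: seen is a Python set, keys collects first occurrences in order;
-- then one dict comprehension {k: 0 for k in keys} per row of range(len(uniq_list)).
def uniqueMatrix_alt (uniq_list : List String) : List (List (String × Int)) :=
  let sk : PySem.Set String × List String :=
    uniq_list.foldl (fun p w =>
      if PySem.Set.contains p.1 w then p else (PySem.Set.add p.1 w, p.2 ++ [w]))
      (PySem.Set.empty, [])
  let keys := sk.2
  let row : PySem.Dict String Int :=
    keys.foldl (fun d k => d.insert k 0) PySem.Dict.empty
  (PySem.List.pyRange 0 (PySem.List.len uniq_list) 1).map (fun _ => row.items)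

-- ===== PRECONDITION & SPEC =====
def Spec_uniqueMatrix (uniq_list : List String) (out : List (List (String × Int))) : Prop := out = uniqueMatrix_alt uniq_list
instance (uniq_list : List String) (out : List (List (String × Int))) : Decidable (Spec_uniqueMatrix uniq_list out) := by unfold Spec_uniqueMatrix; infer_instance

-- ===== CLAIM (what is proved, stated in full; the proofs are below) =====
def Claim_equal_uniqueMatrix : Prop := ∀ (uniq_list : List String), Dom_uniqueMatrix uniq_list → Spec_uniqueMatrix uniq_list (uniqueMatrix uniq_list)

-- ===== LEMMAS AND PROOFS =====

-- The inner loop of A writes the whole fold into slot n of the matrix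
-- (stated after simp-normalising pyGetD/pySetD at a Nat index to getD/set).
theorem inner_loop_set (l : List String) (m : List (PySem.Dict String Int)) (n : Nat)
    (h : n < m.length) :
    l.foldl (fun m w => m.set n ((m.getD n PySem.Dict.empty).insert w 0)) m
      = m.set n (l.foldl (fun r w => r.insert w 0) m[n]) := by
  induction l generalizing m with
  | nil => simp
  | cons w ws ih =>
      simp only [List.foldl_cons]
      rw [ih _ (by simpa using h), List.set_set]
      congr 1
      rw [List.getElem_set_self, List.getD_eq_getElem _ _ h]

-- After the outer loop has run over range(0, k), the matrix is k copies of the template row.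
theorem outer_loop_replicate (l : List String) (k : Nat) :
    (PySem.List.pyRange 0 (k : Int) 1).foldl (fun matrix i =>
      (PySem.List.pyRange 0 ((l.length : Int)) 1).foldl (fun matrix j =>
        PySem.List.pySetD matrix i
          ((PySem.List.pyGetD matrix i PySem.Dict.empty).insert
            (PySem.List.pyGetD l j "") 0))
        (matrix ++ [(PySem.Dict.empty : PySem.Dict String Int)])) []
    = List.replicate k (l.foldl (fun d w => d.insert w 0) PySem.Dict.empty) := by
  induction k with
  | zero => simp [PySem.List.pyRange_zero_nat]
  | succ k ih =>
      rw [show ((k + 1 : Nat) : Int) = (k : Int) + 1 by push_cast; ring,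
          PySem.List.pyRange_one_succ_right (by positivity), List.foldl_append]
      rw [ih]
      simp only [List.foldl_cons, List.foldl_nil]
      rw [PySem.List.foldl_pyRange_zero_pyGetD' l ""
        (fun m w => PySem.List.pySetD m (k : Int)
          ((PySem.List.pyGetD m (k : Int) PySem.Dict.empty).insert w 0))]
      simp only [PySem.List.pyGetD_natCast, PySem.List.pySetD_natCast]
      rw [inner_loop_set l _ k (by simp)]
      rw [List.getElem_append_right (by simp)]
      rw [List.set_append_right _ _ (by simp)]
      simp [List.replicate_succ']

-- B's dedup loop: both components of the pair evolve by Set.add, so from equal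
-- components it returns (Set.update s l, Set.update s l).
theorem dedup_loop_pair (l : List String) (s : PySem.Set String) :
    l.foldl (fun p w =>
      if PySem.Set.contains p.1 w then p else (PySem.Set.add p.1 w, p.2 ++ [w]))
      (s, s)
    = (PySem.Set.update s l, PySem.Set.update s l) := by
  induction l generalizing s with
  | nil => simp [PySem.Set.update]
  | cons w ws ih =>
      simp only [List.foldl_cons]
      have hstep : (if PySem.Set.contains s w then (s, s)
          else (PySem.Set.add s w, s ++ [w])) = (PySem.Set.add s w, PySem.Set.add s w) := by
        by_cases hm : w ∈ s <;>
          simp [PySem.Set.add, PySem.Set.contains, hm]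
      rw [hstep, ih]
      simp [PySem.Set.update]

-- A fold of insert-with-0 keeps the items a zero-valued copy of the key set:
-- from items = s.map (·,0) it yields items = (Set.update s l).map (·,0).
theorem items_fold_insert_zero (l : List String) (s : PySem.Set String)
    (d : PySem.Dict String Int) (h : d.items = s.map (fun k => (k, (0 : Int)))) :
    (l.foldl (fun d w => d.insert w 0) d).items
      = (PySem.Set.update s l).map (fun k => (k, (0 : Int))) := by
  induction l generalizing s d with
  | nil => simpa [PySem.Set.update] using h
  | cons w ws ih =>
      simp only [List.foldl_cons]
      have hkeys : d.keys = s := by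
        simp [PySem.Dict.keys, h, Function.comp_def]
      have hcont : d.contains w = PySem.Set.contains s w := by
        rw [PySem.Dict.contains_eq_decide_mem_keys, hkeys]
        simp [PySem.Set.contains]
      rw [show PySem.Set.update s (w :: ws) = PySem.Set.update (PySem.Set.add s w) ws by
        simp [PySem.Set.update]]
      apply ih
      by_cases hc : PySem.Set.contains s w = true
      · have hm : w ∈ s := by simpa [PySem.Set.contains] using hc
        rw [PySem.Dict.items_insert_of_contains _ 0 (by rw [hcont]; exact hc), h]
        have hadd : PySem.Set.add s w = s := by simp [PySem.Set.add, PySem.Set.contains, hm]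
        rw [hadd, List.map_map]
        apply List.map_congr_left
        intro k _
        by_cases hk : k == w <;> simp_all
      · have hm : w ∉ s := by simpa [PySem.Set.contains] using hc
        rw [PySem.Dict.items_insert_of_not_contains _ 0 (by rw [hcont]; simpa using hc), h]
        have hadd : PySem.Set.add s w = s ++ [w] := by simp [PySem.Set.add, PySem.Set.contains, hm]
        simp [hadd]

-- Both programs produce the same single row: zeros over the first-occurrence key set.
theorem row_items_eq (l : List String) :
    (l.foldl (fun d w => d.insert w 0) (PySem.Dict.empty : PySem.Dict String Int)).items
      = (PySem.Set.ofList l).map (fun k => (k, (0 : Int))) := by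
  rw [items_fold_insert_zero l PySem.Set.empty _ (by rfl)]
  simp [PySem.Set.ofList_eq_foldl, PySem.Set.update, PySem.Set.empty]

-- ===== VERDICT (by name: the statement is the Claim_ definition above) =====
theorem uniqueMatrix_spec : Claim_equal_uniqueMatrix := by
  intro l _
  show uniqueMatrix l = uniqueMatrix_alt l
  unfold uniqueMatrix uniqueMatrix_alt
  simp only [PySem.List.len]
  have hinit : ((PySem.Set.empty : PySem.Set String), ([] : List String))
      = ((PySem.Set.empty : PySem.Set String), (PySem.Set.empty : PySem.Set String)) := rfl
  rw [outer_loop_replicate l l.length, hinit, dedup_loop_pair l PySem.Set.empty]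
  have hkeys : PySem.Set.update (PySem.Set.empty : PySem.Set String) l
      = PySem.Set.ofList l := by
    simp [PySem.Set.ofList_eq_foldl, PySem.Set.update, PySem.Set.empty]
  rw [hkeys, List.map_replicate, List.map_const']
  rw [row_items_eq l,
    items_fold_insert_zero (PySem.Set.ofList l) PySem.Set.empty _ (by rfl)]
  have hupd : PySem.Set.update (PySem.Set.empty : PySem.Set String) (PySem.Set.ofList l)
      = PySem.Set.ofList l := by
    show PySem.Set.ofList (PySem.Set.ofList l) = PySem.Set.ofList l
    exact PySem.Set.ofList_ofList l
  rw [hupd]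
  congr 1
  simp [PySem.List.pyRange_zero_natCast]
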